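-- pv_equiv track=rewrite | github.com/tcozzib/TPgrupal-NicolasAristidesTomas | biblioteca.py | todasEnLaMismaColumna
-- ===== SOURCE A (Python) =====
-- Posición = tuple[str,int]            # una ubicación de una grilla, dada por una letra y un número
--
-- def númeroDePosición(posición: Posición) -> int:
--     """ Describe el número de la posición *posición*. """
--     return posición[1]
--
-- def todasEnLaMismaColumna(posiciones: list[Posición]) -> bool:
--     """ Indica si todas las posiciones en *posiciones* pertenecen a la misma columna.
--         PRE: sonPosicionesVálidas(posiciones)
--     """
--     if len(posiciones) == 0:
--         return True
--     númeroDeColumna = númeroDePosición(posiciones[0])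
--     posiciónActual = 1
--     while posiciónActual < len(posiciones) and númeroDePosición(posiciones[posiciónActual]) == númeroDeColumna:
--         posiciónActual += 1
--     return posiciónActual == len(posiciones)
-- ===== SOURCE B (Python) =====
-- def todasEnLaMismaColumna(posiciones):
--     """ Indica si todas las posiciones pertenecen a la misma columna. """
--     return len({p[1] for p in posiciones}) <= 1
-- ===== Notes on version B (the rewrite author's own statement) =====
-- stated objective: idiomatic
-- what changed: Replaced the index-based early-exit while loop comparing each column to the first with a set comprehension collecting the distinct column numbers and a cardinality test (len <= 1).
import Mathlib
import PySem

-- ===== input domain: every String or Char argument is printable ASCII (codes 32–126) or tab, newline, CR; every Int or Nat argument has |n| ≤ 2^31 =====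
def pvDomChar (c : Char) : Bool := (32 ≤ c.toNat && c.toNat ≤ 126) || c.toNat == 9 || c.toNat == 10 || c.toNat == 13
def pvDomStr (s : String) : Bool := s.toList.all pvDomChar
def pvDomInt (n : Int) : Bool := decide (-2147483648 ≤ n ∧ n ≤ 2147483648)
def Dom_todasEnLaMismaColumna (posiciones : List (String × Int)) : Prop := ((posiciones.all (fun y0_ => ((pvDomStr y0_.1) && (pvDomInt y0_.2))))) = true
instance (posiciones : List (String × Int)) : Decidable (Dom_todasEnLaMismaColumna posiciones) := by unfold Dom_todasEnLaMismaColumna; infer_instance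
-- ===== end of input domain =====

-- B replaces A's index-based early-exit comparison loop with a set of the distinct
-- column numbers whose cardinality decides the answer (idiomatic; same cost).

-- ===== PORT A =====
def numeroDePosicion (posicion : String × Int) : Int := posicion.2

-- the while loop of A: advance while the current position's column equals the first one
def todasEnLaMismaColumna_loop (posiciones : List (String × Int)) (numeroDeColumna : Int)
    (posicionActual : Nat) : Nat :=
  if h : posicionActual < posiciones.length then
    if numeroDePosicion posiciones[posicionActual] == numeroDeColumna then
      todasEnLaMismaColumna_loop posiciones numeroDeColumna (posicionActual + 1)
    else posicionActual
  else posicionActual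
termination_by posiciones.length - posicionActual

def todasEnLaMismaColumna (posiciones : List (String × Int)) : Bool :=
  if posiciones.length = 0 then true
  else
    let numeroDeColumna := numeroDePosicion (posiciones.headI)
    let posicionActual := todasEnLaMismaColumna_loop posiciones numeroDeColumna 1
    posicionActual == posiciones.length

-- ===== PORT B =====
def todasEnLaMismaColumna_alt (posiciones : List (String × Int)) : Bool :=
  decide ((PySem.Set.ofList (posiciones.map (fun p => p.2))).length ≤ 1)

-- ===== PRECONDITION & SPEC =====
def Spec_todasEnLaMismaColumna (posiciones : List (String × Int)) (out : Bool) : Prop := out = todasEnLaMismaColumna_alt posiciones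
instance (posiciones : List (String × Int)) (out : Bool) : Decidable (Spec_todasEnLaMismaColumna posiciones out) := by unfold Spec_todasEnLaMismaColumna; infer_instance

-- ===== CLAIM (what is proved, stated in full; the proofs are below) =====
def Claim_equal_todasEnLaMismaColumna : Prop := ∀ (posiciones : List (String × Int)), Dom_todasEnLaMismaColumna posiciones → Spec_todasEnLaMismaColumna posiciones (todasEnLaMismaColumna posiciones)

-- ===== LEMMAS AND PROOFS =====

-- A's loop reaches the end of the list iff every position from index i on has column col
theorem loop_eq_length_iff (posiciones : List (String × Int)) (col : Int) (i : Nat)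
    (hi : i ≤ posiciones.length) :
    todasEnLaMismaColumna_loop posiciones col i = posiciones.length ↔
      (posiciones.drop i).all (fun p => p.2 == col) = true := by
  induction i using todasEnLaMismaColumna_loop.induct posiciones col with
  | case1 i h hc ih =>
    rw [todasEnLaMismaColumna_loop, dif_pos h, if_pos hc]
    rw [ih (by omega)]
    have hdrop : posiciones.drop i = posiciones[i] :: posiciones.drop (i + 1) :=
      List.drop_eq_getElem_cons h
    rw [hdrop]
    simp only [numeroDePosicion] at hc
    simp only [List.all_cons, Bool.and_eq_true]
    exact ⟨fun hh => ⟨hc, hh⟩, And.right⟩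
  | case2 i h hc =>
    rw [todasEnLaMismaColumna_loop, dif_pos h, if_neg hc]
    have hdrop : posiciones.drop i = posiciones[i] :: posiciones.drop (i + 1) :=
      List.drop_eq_getElem_cons h
    rw [hdrop]
    simp only [numeroDePosicion] at hc
    simp only [List.all_cons]
    constructor
    · intro he; omega
    · intro hh
      simp only [Bool.and_eq_true] at hh
      exact absurd hh.1 (by simpa using hc)
  | case3 i h =>
    rw [todasEnLaMismaColumna_loop, dif_neg h]
    have : i = posiciones.length := by omega
    subst this
    simp

-- folding Set.add over a nonempty accumulator keeps the set at size ≤ 1 iff everything folded is already in it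
theorem foldl_add_len_le_one (cs : List Int) (s : PySem.Set Int) (hs : s ≠ []) :
    (cs.foldl PySem.Set.add s).length ≤ 1 ↔ s.length ≤ 1 ∧ ∀ x ∈ cs, x ∈ s := by
  induction cs generalizing s with
  | nil => simp
  | cons c cs ih =>
    simp only [List.foldl_cons]
    by_cases hc : c ∈ s
    · have hadd : PySem.Set.add s c = s := by
        simp [PySem.Set.add, PySem.Set.contains, hc]
      rw [hadd, ih s hs]
      constructor
      · rintro ⟨h1, h2⟩
        refine ⟨h1, fun x hx => ?_⟩
        rcases List.mem_cons.mp hx with rfl | hx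
        · exact hc
        · exact h2 _ hx
      · rintro ⟨h1, h2⟩
        exact ⟨h1, fun x hx => h2 x (List.mem_cons_of_mem _ hx)⟩
    · have hadd : PySem.Set.add s c = s ++ [c] := by
        simp [PySem.Set.add, PySem.Set.contains, hc]
      rw [hadd, ih _ (by simp)]
      rcases s with _ | ⟨a, s'⟩
      · exact absurd rfl hs
      · constructor
        · rintro ⟨h1, -⟩
          exfalso
          simp only [List.length_append, List.length_cons] at h1
          omega
        · rintro ⟨-, h2⟩
          exact absurd (h2 c List.mem_cons_self) hc

-- B on a nonempty list: the distinct-column set has at most one element iff all columns equal the first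
theorem alt_char (p : String × Int) (rest : List (String × Int)) :
    todasEnLaMismaColumna_alt (p :: rest) = rest.all (fun q => q.2 == p.2) := by
  unfold todasEnLaMismaColumna_alt
  have h1 : PySem.Set.ofList ((p :: rest).map (fun q => q.2)) =
      (rest.map (fun q => q.2)).foldl PySem.Set.add [p.2] := by
    rw [PySem.Set.ofList_eq_foldl]
    simp [PySem.Set.add, PySem.Set.contains]
  rw [h1]
  have key : ((rest.map (fun q => q.2)).foldl PySem.Set.add [p.2]).length ≤ 1 ↔
      rest.all (fun q => q.2 == p.2) = true := by
    rw [foldl_add_len_le_one _ _ (by simp)]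
    simp only [List.length_singleton, le_refl, true_and, List.forall_mem_map,
      List.mem_singleton, List.all_eq_true, beq_iff_eq]
  rw [Bool.eq_iff_iff]
  simpa using key

-- ===== VERDICT (by name: the statement is the Claim_ definition above) =====
theorem todasEnLaMismaColumna_spec : Claim_equal_todasEnLaMismaColumna := by
  intro posiciones _
  unfold Spec_todasEnLaMismaColumna todasEnLaMismaColumna
  cases posiciones with
  | nil => simp [todasEnLaMismaColumna_alt, PySem.Set.ofList]
  | cons p rest =>
    simp only [List.length_cons, Nat.succ_ne_zero, List.headI]
    rw [alt_char]
    have hloop := loop_eq_length_iff (p :: rest) (numeroDePosicion p) 1 (by simp)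
    simp only [List.drop_one, List.tail_cons, List.length_cons, numeroDePosicion] at hloop
    rw [if_neg not_false]
    simp only [numeroDePosicion]
    rw [Bool.eq_iff_iff, beq_iff_eq]
    exact hloop
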